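-- pv_equiv track=rewrite | github.com/salobinks/RechercheOPL3 | B3_transport_methods.py | calcul_couts_potentiels
-- ===== SOURCE A (Python) =====
-- def calcul_couts_potentiels(graph_data, dict_items):
--     """
--     Calculer les coûts potentiels pour chaque cellule du tableau.
--     :param graph_data: Dictionnaire contenant les données du problème de transport
--     :param dict_items: Dictionnaire contenant les valeurs des potentiels
--     :return: Tableau des coûts potentiels
--     """
--     taille = graph_data['taille']
--     tableau = [[0] * taille[1] for _ in range(taille[0])]
--
--     for i in range(taille[0]):
--         for j in range(taille[1]):
--             p_key = 'P' + str(i + 1)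
--             c_key = 'C' + str(j + 1)
--             p_value = dict_items.get(p_key, 0)
--             c_value = dict_items.get(c_key, 0)
--             tableau[i][j] = p_value - c_value
--
--     return tableau
-- ===== SOURCE B (Python) =====
-- def calcul_couts_potentiels(graph_data, dict_items):
--     """Reverse-index scatter: build key->index maps once, make one pass over
--     dict_items filling row/column potential arrays, then take their outer difference."""
--     taille = graph_data['taille']
--     n, m = taille[0], taille[1]
--     prow = {'P' + str(i + 1): i for i in range(n)}
--     pcol = {'C' + str(j + 1): j for j in range(m)}
--     row = [0] * n
--     col = [0] * m
--     for key, value in dict_items.items():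
--         if key in prow:
--             row[prow[key]] = value
--         elif key in pcol:
--             col[pcol[key]] = value
--     return [[p - c for c in col] for p in row]
-- ===== Notes on version B (the rewrite author's own statement) =====
-- stated objective: alternative
-- what changed: B inverts A's gather: instead of A's n*m doubly-nested loop that rebuilds both key strings and looks both up per cell, B builds two reverse-index dicts key->position once, makes a single scatter pass over dict_items filling the row/column potential arrays, and returns their outer difference.
-- outside the precondition, e.g. on calcul_couts_potentiels({'taille': [0]}, {}): A returns [], B raises IndexError
import Mathlib
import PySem

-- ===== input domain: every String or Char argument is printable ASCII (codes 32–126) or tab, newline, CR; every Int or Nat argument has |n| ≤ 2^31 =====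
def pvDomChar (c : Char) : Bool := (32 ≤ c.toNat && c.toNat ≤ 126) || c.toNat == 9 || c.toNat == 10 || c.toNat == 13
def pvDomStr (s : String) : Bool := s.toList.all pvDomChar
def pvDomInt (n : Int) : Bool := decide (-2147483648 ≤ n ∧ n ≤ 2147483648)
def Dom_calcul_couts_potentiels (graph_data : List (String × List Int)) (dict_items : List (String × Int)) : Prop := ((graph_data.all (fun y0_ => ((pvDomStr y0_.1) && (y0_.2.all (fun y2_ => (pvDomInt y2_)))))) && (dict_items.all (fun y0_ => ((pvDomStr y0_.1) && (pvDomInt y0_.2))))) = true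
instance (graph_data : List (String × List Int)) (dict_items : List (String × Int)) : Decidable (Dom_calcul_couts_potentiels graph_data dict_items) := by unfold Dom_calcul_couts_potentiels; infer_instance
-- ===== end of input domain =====

-- B inverts A's per-cell gather: it builds reverse-index dicts key -> position once, fills the
-- two potential arrays in one scatter pass over dict_items, and returns their outer difference
-- (objective: alternative algorithm, same asymptotic cost).

-- ===== PORT A =====
-- literal port of A: zero table, then tableau[i][j] = dict_items.get('P'+str(i+1),0) - dict_items.get('C'+str(j+1),0)
def calcul_couts_potentiels (graph_data : List (String × List Int)) (dict_items : List (String × Int)) : List (List Int) :=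
  let taille := (PySem.Dict.mk graph_data).getD "taille" []
  let tableau := (PySem.List.pyRange 0 (PySem.List.pyGetD taille 0 0) 1).map
    (fun _ => PySem.List.pyRepeat [(0 : Int)] (PySem.List.pyGetD taille 1 0))
  (PySem.List.pyRange 0 (PySem.List.pyGetD taille 0 0) 1).foldl (fun tab i =>
    (PySem.List.pyRange 0 (PySem.List.pyGetD taille 1 0) 1).foldl (fun tab j =>
      let p_key := "P" ++ PySem.Int.toStr (i + 1)
      let c_key := "C" ++ PySem.Int.toStr (j + 1)
      let p_value := (PySem.Dict.mk dict_items).getD p_key 0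
      let c_value := (PySem.Dict.mk dict_items).getD c_key 0
      PySem.List.pySetD tab i (PySem.List.pySetD (PySem.List.pyGetD tab i []) j (p_value - c_value))) tab) tableau

-- ===== PORT B =====
-- literal port of Source B: reverse-index dicts prow/pcol, one scatter pass over dict_items
-- (the items of the dict, in order), then the outer difference of the two arrays
def calcul_couts_potentiels_alt (graph_data : List (String × List Int)) (dict_items : List (String × Int)) : List (List Int) :=
  let taille := (PySem.Dict.mk graph_data).getD "taille" []
  let n := PySem.List.pyGetD taille 0 0
  let m := PySem.List.pyGetD taille 1 0
  let prow := PySem.Dict.mk ((PySem.List.pyRange 0 n 1).map (fun i => ("P" ++ PySem.Int.toStr (i + 1), i)))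
  let pcol := PySem.Dict.mk ((PySem.List.pyRange 0 m 1).map (fun j => ("C" ++ PySem.Int.toStr (j + 1), j)))
  let rc := dict_items.foldl (fun (rc : List Int × List Int) kv =>
      match prow.get? kv.1 with
      | some i => (PySem.List.pySetD rc.1 i kv.2, rc.2)
      | none =>
        match pcol.get? kv.1 with
        | some j => (rc.1, PySem.List.pySetD rc.2 j kv.2)
        | none => rc)
    (PySem.List.pyRepeat [(0 : Int)] n, PySem.List.pyRepeat [(0 : Int)] m)
  rc.1.map (fun p => rc.2.map (fun c => p - c))

-- ===== PRECONDITION & SPEC =====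
-- Pre_ excludes (a) the inputs where A raises (missing 'taille' key or 'taille' shorter than 2:
-- there A raises KeyError/IndexError except in the accidental corner taille = [k] with k <= 0,
-- where A's lazy comprehension returns [] while B's eager read of taille[1] raises IndexError),
-- and (b) association lists whose keys are not distinct, which do not represent any Python dict
-- argument (a dict cannot carry duplicate keys), so first-vs-last-match there is accidental.
def Pre_calcul_couts_potentiels (graph_data : List (String × List Int)) (dict_items : List (String × Int)) : Prop :=
  2 ≤ ((PySem.Dict.mk graph_data).getD "taille" []).length ∧ (dict_items.map Prod.fst).Nodup
instance (graph_data : List (String × List Int)) (dict_items : List (String × Int)) : Decidable (Pre_calcul_couts_potentiels graph_data dict_items) := by unfold Pre_calcul_couts_potentiels; infer_instance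
def pvWitness_calcul_couts_potentiels : (List (String × List Int)) × (List (String × Int)) :=
  ([("taille", [2, 2])], [("P1", 5), ("C2", 3)])
def Spec_calcul_couts_potentiels (graph_data : List (String × List Int)) (dict_items : List (String × Int)) (out : List (List Int)) : Prop := out = calcul_couts_potentiels_alt graph_data dict_items
instance (graph_data : List (String × List Int)) (dict_items : List (String × Int)) (out : List (List Int)) : Decidable (Spec_calcul_couts_potentiels graph_data dict_items out) := by unfold Spec_calcul_couts_potentiels; infer_instance

-- ===== CLAIM (what is proved, stated in full; the proofs are below) =====
def Claim_equal_calcul_couts_potentiels : Prop := ∀ (graph_data : List (String × List Int)) (dict_items : List (String × Int)), Dom_calcul_couts_potentiels graph_data dict_items → Pre_calcul_couts_potentiels graph_data dict_items → Spec_calcul_couts_potentiels graph_data dict_items (calcul_couts_potentiels graph_data dict_items)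

-- ===== LEMMAS AND PROOFS =====

/- ---------- decimal-representation canonicity: Nat.toDigits 10 is injective ---------- -/

lemma toDigitsCore_eq (n : Nat) : ∀ (fuel : Nat) (acc : List Char), n < fuel →
    Nat.toDigitsCore 10 fuel n acc = Nat.toDigits 10 n ++ acc := by
  induction n using Nat.strong_induction_on with
  | _ n ih =>
    intro fuel acc h
    unfold Nat.toDigits
    cases fuel with
    | zero => omega
    | succ f =>
      by_cases h10 : n / 10 = 0
      · unfold Nat.toDigitsCore
        simp [h10]
      · have h2 : n / 10 < n := Nat.div_lt_self (by omega) (by omega)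
        unfold Nat.toDigitsCore
        cases n with
        | zero => omega
        | succ k =>
          simp only [h10, if_false]
          rw [ih _ h2 _ _ (by omega), ih _ h2 _ _ (by omega)]
          simp

def pvDec (cs : List Char) : Nat := cs.foldl (fun a c => 10 * a + (c.toNat - 48)) 0

lemma pvDec_toDigits (n : Nat) : pvDec (Nat.toDigits 10 n) = n := by
  induction n using Nat.strong_induction_on with
  | _ n ih =>
    by_cases h10 : n / 10 = 0
    · have hn : n < 10 := by omega
      unfold Nat.toDigits Nat.toDigitsCore
      simp [h10, pvDec]
      interval_cases n <;> decide
    · unfold Nat.toDigits Nat.toDigitsCore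
      simp only [h10, if_false]
      rw [toDigitsCore_eq _ _ _ (by omega)]
      have hih := ih (n / 10) (Nat.div_lt_self (by omega) (by omega))
      simp only [pvDec, List.foldl_append, List.foldl_cons, List.foldl_nil] at hih ⊢
      rw [hih]
      have hd : (n % 10).digitChar.toNat - 48 = n % 10 := by
        have hm : n % 10 < 10 := Nat.mod_lt _ (by omega)
        interval_cases h : n % 10 <;> decide
      rw [hd]
      omega

lemma toDigits_inj {a b : Nat} (h : Nat.toDigits 10 a = Nat.toDigits 10 b) : a = b := by
  have := pvDec_toDigits a
  rw [h, pvDec_toDigits] at this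
  omega

/- ---------- the key maps i ↦ "P"+str(i+1), j ↦ "C"+str(j+1) ---------- -/

def pvKey (c : Char) (i : Int) : String := String.ofList [c] ++ PySem.Int.toStr (i + 1)

lemma pvKey_toList (c : Char) (i : Int) :
    (pvKey c i).toList = c :: PySem.Int.toChars (i + 1) := by
  simp [pvKey, PySem.Int.toList_toStr]

lemma pvKey_inj {c : Char} {a b : Int} (ha : 0 ≤ a) (hb : 0 ≤ b)
    (h : pvKey c a = pvKey c b) : a = b := by
  have h1 := congrArg String.toList h
  rw [pvKey_toList, pvKey_toList] at h1
  have h2 : PySem.Int.toChars (a + 1) = PySem.Int.toChars (b + 1) := by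
    simpa using h1
  unfold PySem.Int.toChars at h2
  rw [if_neg (by omega), if_neg (by omega)] at h2
  have := toDigits_inj h2
  omega

lemma pvKey_ne {c c' : Char} (hcc : c ≠ c') (a b : Int) : pvKey c a ≠ pvKey c' b := by
  intro h
  have h1 := congrArg String.toList h
  rw [pvKey_toList, pvKey_toList] at h1
  exact hcc (by injection h1)

/- ---------- reverse-index dict built from a range: get? characterization ---------- -/

lemma find?_unique {α : Type} {p : α → Bool} {a : α} :
    ∀ (l : List α), a ∈ l → p a = true → (∀ b ∈ l, p b = true → b = a) →
    l.find? p = some a := by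
  intro l
  induction l with
  | nil => intro h; cases h
  | cons x xs ih =>
    intro hmem hpa huniq
    by_cases hx : p x = true
    · rw [List.find?_cons_of_pos hx, huniq x (List.mem_cons_self) hx]
    · rw [List.find?_cons_of_neg (by simpa using hx)]
      have hax : a ≠ x := fun he => hx (he ▸ hpa)
      exact ih (by rcases List.mem_cons.1 hmem with h | h; exact absurd h hax; exact h)
        hpa (fun b hb => huniq b (List.mem_cons_of_mem _ hb))

-- the reverse-index dict is a find? over the range
lemma revIndex_get? (c : Char) (n : Int) (x : String) :
    (PySem.Dict.mk ((PySem.List.pyRange 0 n 1).map (fun i => (pvKey c i, i)))).get? x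
    = (PySem.List.pyRange 0 n 1).find? (fun i => pvKey c i == x) := by
  unfold PySem.Dict.get?
  rw [List.find?_map, Option.map_map]
  show Option.map id (List.find? ((fun p : String × Int => p.1 == x) ∘ (fun i => (pvKey c i, i))) (PySem.List.pyRange 0 n 1)) = _
  rw [Option.map_id]
  rfl

lemma revIndex_get?_some {c : Char} {n : Int} {x : String} {i : Int}
    (h : (PySem.Dict.mk ((PySem.List.pyRange 0 n 1).map (fun i => (pvKey c i, i)))).get? x = some i) :
    (0 ≤ i ∧ i < n) ∧ x = pvKey c i := by
  rw [revIndex_get?] at h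
  refine ⟨PySem.List.mem_pyRange_one.1 (List.mem_of_find?_eq_some h), ?_⟩
  have h2 : pvKey c i = x := by simpa using List.find?_some h
  exact h2.symm

lemma revIndex_get?_key {c : Char} {n i : Int} (h0 : 0 ≤ i) (hn : i < n) :
    (PySem.Dict.mk ((PySem.List.pyRange 0 n 1).map (fun i => (pvKey c i, i)))).get? (pvKey c i) = some i := by
  rw [revIndex_get?]
  refine find?_unique _ (PySem.List.mem_pyRange_one.2 ⟨h0, hn⟩) (by simp) ?_
  intro b hb hpb
  have hb0 : 0 ≤ b := (PySem.List.mem_pyRange_one.1 hb).1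
  exact pvKey_inj hb0 h0 (by simpa using hpb)

/- ---------- first-match lookup over an append (dict with nodup keys) ---------- -/

lemma getD_mk_append_last {L : List (String × Int)} {kv : String × Int} {d : Int}
    (hnew : kv.1 ∉ L.map Prod.fst) :
    (PySem.Dict.mk (L ++ [kv])).getD kv.1 d = kv.2 := by
  unfold PySem.Dict.getD PySem.Dict.get?
  rw [List.find?_append]
  have h1 : L.find? (fun p => p.1 == kv.1) = none := by
    rw [List.find?_eq_none]
    intro p hp hpe
    exact hnew (List.mem_map.2 ⟨p, hp, (by simpa using hpe)⟩)
  simp [h1]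

lemma getD_mk_append_other {L : List (String × Int)} {kv : String × Int} {x : String} {d : Int}
    (hne : kv.1 ≠ x) :
    (PySem.Dict.mk (L ++ [kv])).getD x d = (PySem.Dict.mk L).getD x d := by
  unfold PySem.Dict.getD PySem.Dict.get?
  rw [List.find?_append]
  cases h1 : L.find? (fun p => p.1 == x) with
  | some p => simp
  | none => simp [hne]


/- ---------- small list facts ---------- -/

lemma set_map_range {α : Type} (f : Nat → α) (N k : Nat) (v : α) (hk : k < N) :
    ((List.range N).map f).set k v = (List.range N).map (fun x => if x = k then v else f x) := by
  apply List.ext_getElem (by simp)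
  intro t h1 h2
  simp only [List.getElem_set, List.getElem_map, List.getElem_range]
  rcases eq_or_ne t k with rfl | hne
  · simp
  · simp [hne, Ne.symm hne]

/- ---------- the scatter pass computes the two potential vectors ---------- -/

-- one scatter step, as it appears in the port of B
def pvStep (n m : Int) (rc : List Int × List Int) (kv : String × Int) : List Int × List Int :=
  match (PySem.Dict.mk ((PySem.List.pyRange 0 n 1).map (fun i => (pvKey 'P' i, i)))).get? kv.1 with
  | some i => (PySem.List.pySetD rc.1 i kv.2, rc.2)
  | none =>
    match (PySem.Dict.mk ((PySem.List.pyRange 0 m 1).map (fun j => (pvKey 'C' j, j)))).get? kv.1 with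
    | some j => (rc.1, PySem.List.pySetD rc.2 j kv.2)
    | none => rc

lemma scatter_eq (n m : Int) :
    ∀ (L : List (String × Int)), (L.map Prod.fst).Nodup →
    L.foldl (pvStep n m)
      (List.replicate n.toNat 0, List.replicate m.toNat 0)
    = ((List.range n.toNat).map (fun (k : Nat) => (PySem.Dict.mk L).getD (pvKey 'P' (k : Int)) 0),
       (List.range m.toNat).map (fun (k : Nat) => (PySem.Dict.mk L).getD (pvKey 'C' (k : Int)) 0)) := by
  intro L
  induction L using List.reverseRecOn with
  | nil =>
    intro _
    simp [PySem.Dict.getD, PySem.Dict.get?, List.map_const']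
  | append_singleton L kv ih =>
    intro hnd
    rw [List.map_append, List.nodup_append] at hnd
    obtain ⟨hndL, -, hdisj⟩ := hnd
    have hnew : kv.1 ∉ L.map Prod.fst := by
      intro hmem
      exact hdisj kv.1 hmem kv.1 (by simp) rfl
    rw [List.foldl_append, ih hndL]
    simp only [List.foldl_cons, List.foldl_nil]
    unfold pvStep
    cases hP : (PySem.Dict.mk ((PySem.List.pyRange 0 n 1).map (fun i => (pvKey 'P' i, i)))).get? kv.1 with
    | some i =>
      obtain ⟨⟨hi0, hin⟩, hkey⟩ := revIndex_get?_some hP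
      obtain ⟨kN, rfl⟩ : ∃ kN : Nat, i = (kN : Int) := ⟨i.toNat, (Int.toNat_of_nonneg hi0).symm⟩
      have hkN : kN < n.toNat := by omega
      simp only [PySem.List.pySetD_natCast]
      refine Prod.ext ?_ ?_
      · show (((List.range n.toNat).map _).set kN kv.2) = _
        rw [set_map_range _ _ _ _ hkN]
        refine List.map_congr_left ?_
        intro t ht
        by_cases hteq : t = kN
        · subst hteq
          rw [if_pos rfl, ← hkey, getD_mk_append_last hnew]
        · rw [if_neg hteq]
          refine (getD_mk_append_other ?_).symm
          rw [hkey]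
          intro hc
          exact hteq (by exact_mod_cast (pvKey_inj (by omega) (by omega) hc).symm)
      · show ((List.range m.toNat).map _) = _
        refine List.map_congr_left ?_
        intro t ht
        refine (getD_mk_append_other ?_).symm
        rw [hkey]
        exact pvKey_ne (by decide) _ _
    | none =>
      have hPnone : ∀ t : Nat, t < n.toNat → kv.1 ≠ pvKey 'P' (t : Int) := by
        intro t htn hc
        rw [hc] at hP
        rw [revIndex_get?_key (by positivity) (by omega)] at hP
        cases hP
      cases hC : (PySem.Dict.mk ((PySem.List.pyRange 0 m 1).map (fun j => (pvKey 'C' j, j)))).get? kv.1 with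
      | some j =>
        obtain ⟨⟨hj0, hjm⟩, hkey⟩ := revIndex_get?_some hC
        obtain ⟨kN, rfl⟩ : ∃ kN : Nat, j = (kN : Int) := ⟨j.toNat, (Int.toNat_of_nonneg hj0).symm⟩
        have hkN : kN < m.toNat := by omega
        simp only [PySem.List.pySetD_natCast]
        refine Prod.ext ?_ ?_
        · show ((List.range n.toNat).map _) = _
          refine List.map_congr_left ?_
          intro t ht
          exact (getD_mk_append_other (hPnone t (List.mem_range.1 ht))).symm
        · show (((List.range m.toNat).map _).set kN kv.2) = _
          rw [set_map_range _ _ _ _ hkN]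
          refine List.map_congr_left ?_
          intro t ht
          by_cases hteq : t = kN
          · subst hteq
            rw [if_pos rfl, ← hkey, getD_mk_append_last hnew]
          · rw [if_neg hteq]
            refine (getD_mk_append_other ?_).symm
            rw [hkey]
            intro hc
            exact hteq (by exact_mod_cast (pvKey_inj (by omega) (by omega) hc).symm)
      | none =>
        have hCnone : ∀ t : Nat, t < m.toNat → kv.1 ≠ pvKey 'C' (t : Int) := by
          intro t htm hc
          rw [hc] at hC
          rw [revIndex_get?_key (by positivity) (by omega)] at hC
          cases hC
        refine Prod.ext ?_ ?_
        · show ((List.range n.toNat).map _) = _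
          exact List.map_congr_left fun t ht =>
            (getD_mk_append_other (hPnone t (List.mem_range.1 ht))).symm
        · show ((List.range m.toNat).map _) = _
          exact List.map_congr_left fun t ht =>
            (getD_mk_append_other (hCnone t (List.mem_range.1 ht))).symm

/- ---------- port A reduced to the outer-difference form (loop lemmas) ---------- -/

-- Overwriting loop: fold over range(nn) setting slot i to g i (read of the old slot) rewrites
-- the first nn slots; the invariant form keeps the untouched tail.
lemma foldl_set_range_aux {α : Type} (g : Int → α → α) (d : α) :
    ∀ (nn : Nat) (xs : List α), nn ≤ xs.length →
    (PySem.List.pyRange 0 (nn : Int) 1).foldl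
      (fun acc i => PySem.List.pySetD acc i (g i (PySem.List.pyGetD acc i d))) xs
    = (List.range nn).map (fun (k : Nat) => g (k : Int) (xs.getD k d)) ++ xs.drop nn := by
  intro nn
  induction nn with
  | zero => intro xs _; simp [PySem.List.pyRange_one_eq_nil]
  | succ n ih =>
    intro xs hlen
    have h1 : ((n + 1 : Nat) : Int) = (n : Int) + 1 := by push_cast; ring
    rw [h1, PySem.List.pyRange_one_succ_right (by positivity), List.foldl_append,
        ih xs (by omega)]
    have hn : n < xs.length := by omega
    have hpre : ((List.range n).map (fun (k : Nat) => g (k : Int) (xs.getD k d))).length = n := by simp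
    have hdrop : xs.drop n = xs[n] :: xs.drop (n + 1) := List.drop_eq_getElem_cons hn
    simp only [List.foldl_cons, List.foldl_nil]
    rw [hdrop]
    have hget : PySem.List.pyGetD ((List.range n).map (fun (k : Nat) => g (k : Int) (xs.getD k d)) ++ xs[n] :: xs.drop (n + 1)) (n : Int) d = xs[n] := by
      rw [PySem.List.pyGetD_natCast]
      simp [List.getD_eq_getElem?_getD, List.getElem?_append_right, List.getElem?_eq_getElem hn]
    rw [hget, PySem.List.pySetD_natCast,
        List.set_append_right _ _ hpre.le]
    rw [hpre, Nat.sub_self, List.set_cons_zero, List.range_succ]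
    simp [List.getD_eq_getElem?_getD, List.getElem?_eq_getElem hn]

-- Same loop when the bound is an arbitrary Int equal to xs.length.
lemma foldl_set_range {α : Type} (g : Int → α → α) (d : α) (m : Int) (xs : List α)
    (hlen : xs.length = m.toNat) :
    (PySem.List.pyRange 0 m 1).foldl
      (fun acc i => PySem.List.pySetD acc i (g i (PySem.List.pyGetD acc i d))) xs
    = (List.range m.toNat).map (fun (k : Nat) => g (k : Int) (xs.getD k d)) := by
  by_cases hm : 0 ≤ m
  · rw [show m = (m.toNat : Int) from (Int.toNat_of_nonneg hm).symm]
    rw [foldl_set_range_aux g d m.toNat xs (by omega), ← hlen, List.drop_length]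
    simp
  · rw [PySem.List.pyRange_one_eq_nil (by omega)]
    have : m.toNat = 0 := by omega
    rw [this] at hlen ⊢
    simp [List.eq_nil_of_length_eq_zero hlen]

-- The inner loop ignores what it reads, so it is the fold with a constant-in-acc g.
lemma inner_loop_eq (f : Int → Int) (m : Int) (row : List Int) (hrow : row.length = m.toNat) :
    (PySem.List.pyRange 0 m 1).foldl (fun r j => PySem.List.pySetD r j (f j)) row
    = (PySem.List.pyRange 0 m 1).map f := by
  have := foldl_set_range (fun i _ => f i) 0 m row hrow
  simpa [PySem.List.pyRange_one, Int.toNat_of_nonneg, List.map_map] using this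

-- Python's 'tableau[i][j] = v' reads slot i, sets j in the row, writes slot i back; the inner
-- loop therefore hoists to a single write of the fully updated row.
lemma pySetD_nil {α : Type} (j : Int) (v : α) : PySem.List.pySetD ([] : List α) j v = [] := by
  simp [PySem.List.pySetD, PySem.List.pySet?]
  cases PySem.List.pyIdx? 0 j <;> rfl

lemma getD_set_self {α : Type} (l : List α) (k : Nat) (v d : α) (h : k < l.length) :
    (l.set k v).getD k d = v := by
  rw [List.getD_eq_getElem?_getD, List.getElem?_eq_getElem (by simpa using h),
      List.getElem_set_self]
  rfl

lemma hoist (k : Nat) (f : Int → Int) (js : List Int) : ∀ (tab : List (List Int)),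
    js.foldl (fun tab j => tab.set k (PySem.List.pySetD (tab.getD k []) j (f j))) tab
    = tab.set k (js.foldl (fun r j => PySem.List.pySetD r j (f j)) (tab.getD k [])) := by
  induction js with
  | nil =>
    intro tab
    simp only [List.foldl_nil]
    by_cases h : k < tab.length
    · rw [List.getD_eq_getElem?_getD, List.getElem?_eq_getElem h]
      exact (List.set_getElem_self h).symm
    · rw [List.set_eq_of_length_le (by omega)]
  | cons j js ih =>
    intro tab
    simp only [List.foldl_cons]
    rw [ih]
    by_cases h : k < tab.length
    · rw [List.set_set, getD_set_self _ _ _ _ h]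
    · have hle : tab.length ≤ k := le_of_not_gt h
      simp [List.set_eq_of_length_le, hle, pySetD_nil, List.getD_eq_getElem?_getD]

-- A's nested mutation loop equals the outer-difference table.
lemma A_eq (graph_data : List (String × List Int)) (dict_items : List (String × Int)) :
    calcul_couts_potentiels graph_data dict_items
    = (List.range (PySem.List.pyGetD ((PySem.Dict.mk graph_data).getD "taille" []) 0 0).toNat).map
        (fun (k : Nat) => (List.range (PySem.List.pyGetD ((PySem.Dict.mk graph_data).getD "taille" []) 1 0).toNat).map
          (fun (t : Nat) => (PySem.Dict.mk dict_items).getD (pvKey 'P' (k : Int)) 0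
                    - (PySem.Dict.mk dict_items).getD (pvKey 'C' (t : Int)) 0)) := by
  unfold calcul_couts_potentiels
  set taille := (PySem.Dict.mk graph_data).getD "taille" [] with htaille
  set n := PySem.List.pyGetD taille 0 0 with hn
  set m := PySem.List.pyGetD taille 1 0 with hm
  set pv : Int → Int := fun i => (PySem.Dict.mk dict_items).getD ("P" ++ PySem.Int.toStr (i + 1)) 0 with hpv
  set cv : Int → Int := fun j => (PySem.Dict.mk dict_items).getD ("C" ++ PySem.Int.toStr (j + 1)) 0 with hcv
  show ((PySem.List.pyRange 0 n 1).foldl (fun tab i =>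
      (PySem.List.pyRange 0 m 1).foldl (fun tab j =>
        PySem.List.pySetD tab i (PySem.List.pySetD (PySem.List.pyGetD tab i []) j (pv i - cv j))) tab)
      ((PySem.List.pyRange 0 n 1).map (fun _ => PySem.List.pyRepeat [(0 : Int)] m)))
    = _
  have hcong : ∀ (tab : List (List Int)), ∀ i ∈ PySem.List.pyRange 0 n 1,
      (PySem.List.pyRange 0 m 1).foldl (fun tab j =>
        PySem.List.pySetD tab i (PySem.List.pySetD (PySem.List.pyGetD tab i []) j (pv i - cv j))) tab
      = PySem.List.pySetD tab i
          ((PySem.List.pyRange 0 m 1).foldl (fun r j => PySem.List.pySetD r j (pv i - cv j))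
            (PySem.List.pyGetD tab i [])) := by
    intro tab i hi
    have hi0 : 0 ≤ i := (PySem.List.mem_pyRange_one.1 hi).1
    obtain ⟨k, rfl⟩ : ∃ k : Nat, i = (k : Int) := ⟨i.toNat, (Int.toNat_of_nonneg hi0).symm⟩
    simp only [PySem.List.pySetD_natCast, PySem.List.pyGetD_natCast]
    exact hoist k _ (PySem.List.pyRange 0 m 1) tab
  rw [PySem.List.foldl_congr_mem _ _ _ _ hcong]
  have hlen0 : ((PySem.List.pyRange 0 n 1).map (fun _ => PySem.List.pyRepeat [(0 : Int)] m)).length = n.toNat := by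
    simp [PySem.List.length_pyRange_one]
  have hmain := foldl_set_range
    (fun (i : Int) (r : List Int) =>
      (PySem.List.pyRange 0 m 1).foldl (fun r j => PySem.List.pySetD r j (pv i - cv j)) r)
    [] n _ hlen0
  refine Eq.trans hmain ?_
  have hrow : ∀ k ∈ List.range n.toNat,
      (fun (i : Int) (r : List Int) =>
        (PySem.List.pyRange 0 m 1).foldl (fun r j => PySem.List.pySetD r j (pv i - cv j)) r) (k : Int)
        (((PySem.List.pyRange 0 n 1).map (fun _ => PySem.List.pyRepeat [(0 : Int)] m)).getD k [])
      = (PySem.List.pyRange 0 m 1).map (fun j => pv k - cv j) := by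
    intro k hk
    have hk' : k < n.toNat := List.mem_range.1 hk
    have hget : (((PySem.List.pyRange 0 n 1).map (fun _ => PySem.List.pyRepeat [(0 : Int)] m)).getD k [])
        = PySem.List.pyRepeat [(0 : Int)] m := by
      rw [List.getD_eq_getElem?_getD, List.getElem?_eq_getElem (by simpa [PySem.List.length_pyRange_one] using hk')]
      simp
    rw [hget]
    exact inner_loop_eq _ m _ (by simp [PySem.List.pyRepeat_singleton])
  rw [List.map_congr_left hrow]
  rw [PySem.List.pyRange_one 0 m]
  simp only [List.map_map, Function.comp_def, zero_add, Int.sub_zero]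
  rfl

-- B's port in terms of the scatter characterization.
lemma B_eq (graph_data : List (String × List Int)) (dict_items : List (String × Int))
    (hnd : (dict_items.map Prod.fst).Nodup) :
    calcul_couts_potentiels_alt graph_data dict_items
    = (List.range (PySem.List.pyGetD ((PySem.Dict.mk graph_data).getD "taille" []) 0 0).toNat).map
        (fun (k : Nat) => (List.range (PySem.List.pyGetD ((PySem.Dict.mk graph_data).getD "taille" []) 1 0).toNat).map
          (fun (t : Nat) => (PySem.Dict.mk dict_items).getD (pvKey 'P' (k : Int)) 0
                    - (PySem.Dict.mk dict_items).getD (pvKey 'C' (t : Int)) 0)) := by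
  unfold calcul_couts_potentiels_alt
  set taille := (PySem.Dict.mk graph_data).getD "taille" [] with htaille
  set n := PySem.List.pyGetD taille 0 0 with hn
  set m := PySem.List.pyGetD taille 1 0 with hm
  have hstep : (fun (rc : List Int × List Int) (kv : String × Int) =>
      match (PySem.Dict.mk ((PySem.List.pyRange 0 n 1).map (fun i => ("P" ++ PySem.Int.toStr (i + 1), i)))).get? kv.1 with
      | some i => (PySem.List.pySetD rc.1 i kv.2, rc.2)
      | none =>
        match (PySem.Dict.mk ((PySem.List.pyRange 0 m 1).map (fun j => ("C" ++ PySem.Int.toStr (j + 1), j)))).get? kv.1 with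
        | some j => (rc.1, PySem.List.pySetD rc.2 j kv.2)
        | none => rc) = pvStep n m := by
    funext rc kv
    show _ = pvStep n m rc kv
    unfold pvStep
    have hP : (fun i : Int => ("P" ++ PySem.Int.toStr (i + 1), i)) = (fun i : Int => (pvKey 'P' i, i)) := by
      funext i; simp [pvKey]
    have hC : (fun j : Int => ("C" ++ PySem.Int.toStr (j + 1), j)) = (fun j : Int => (pvKey 'C' j, j)) := by
      funext j; simp [pvKey]
    rw [hP, hC]
  show (dict_items.foldl _ (PySem.List.pyRepeat [(0 : Int)] n, PySem.List.pyRepeat [(0 : Int)] m)).1.map _ = _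
  rw [hstep]
  rw [show PySem.List.pyRepeat [(0 : Int)] n = List.replicate n.toNat 0 from PySem.List.pyRepeat_singleton _ _,
      show PySem.List.pyRepeat [(0 : Int)] m = List.replicate m.toNat 0 from PySem.List.pyRepeat_singleton _ _]
  rw [scatter_eq n m dict_items hnd]
  simp [List.map_map, Function.comp_def]

-- ===== VERDICT (by name: the statement is the Claim_ definition above) =====
theorem calcul_couts_potentiels_spec : Claim_equal_calcul_couts_potentiels := by
  intro graph_data dict_items _ hpre
  unfold Spec_calcul_couts_potentiels
  rw [A_eq, B_eq _ _ hpre.2]
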